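-- pv_equiv track=rewrite | github.com/2025-II-Infra-ADAII/proyecto-i-ada-ii-grupo-o | src/dinamica.py | precalcular_suma_tr
-- ===== SOURCE A (Python) =====
-- from typing import List, Tuple
--
-- def precalcular_suma_tr(tiempos_riego: List[int], n: int, N: int) -> List[int]:
--     suma_tr = [0] * N
--
--     for mascara in range(1, N):
--         for j in range(n):
--             if mascara & (1 << j):
--                 mascara_anterior = mascara ^ (1 << j)
--                 suma_tr[mascara] = suma_tr[mascara_anterior] + tiempos_riego[j]
--                 break
--
--     return suma_tr
-- ===== SOURCE B (Python) =====
-- def precalcular_suma_tr(tiempos_riego, n, N):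
--     suma_tr = [0]
--     j = 0
--     while len(suma_tr) < N:
--         add = tiempos_riego[j] if j < n else 0
--         suma_tr = suma_tr + [x + add for x in suma_tr]
--         j += 1
--     return suma_tr[:N]
-- ===== Notes on version B (the rewrite author's own statement) =====
-- stated objective: faster
-- what changed: A fills suma_tr by scanning j in range(n) per mask to find its lowest set bit (O(N*n)); B builds the table by doubling: for each bit j it appends a copy of the current block shifted by tiempos_riego[j], writing each entry once (O(N)).
-- outside the precondition, e.g. on precalcular_suma_tr([], 1, 3): A raises IndexError, B raises IndexError
import Mathlib
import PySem

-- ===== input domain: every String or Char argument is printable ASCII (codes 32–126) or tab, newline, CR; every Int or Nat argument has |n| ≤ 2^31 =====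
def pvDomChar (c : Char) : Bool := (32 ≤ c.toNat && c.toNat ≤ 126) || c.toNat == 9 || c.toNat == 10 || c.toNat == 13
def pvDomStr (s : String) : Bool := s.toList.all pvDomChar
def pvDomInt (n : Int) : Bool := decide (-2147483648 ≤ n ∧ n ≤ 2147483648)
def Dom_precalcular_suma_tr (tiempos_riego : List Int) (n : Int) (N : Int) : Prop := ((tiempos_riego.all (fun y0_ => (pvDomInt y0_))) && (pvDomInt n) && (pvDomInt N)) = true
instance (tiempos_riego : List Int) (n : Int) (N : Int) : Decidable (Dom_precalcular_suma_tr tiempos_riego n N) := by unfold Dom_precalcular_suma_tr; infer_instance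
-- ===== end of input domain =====

-- B replaces A's per-mask inner scan for the lowest set bit by doubling the table block by
-- block (each block j copies the previous table shifted by tiempos_riego[j]), O(N) vs O(N·n).

-- ===== PORT A =====
-- inner 'for j in range(n): if mascara & (1 << j): …; break' loop, as the index recursion
-- j = 0, 1, … while j < n with early exit at the first set bit;
-- j ≥ 0 always here, so '1 << j' is '1 <<< j.toNat' exactly.
def pvInnerA (t : List Int) (n : Int) (suma : List Int) (mascara : Int) (j : Int) : List Int :=
  if _h : j < n then
    if PySem.Int.band mascara (1 <<< j.toNat) ≠ 0 then
      PySem.List.pySetD suma mascara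
        (PySem.List.pyGetD suma (PySem.Int.bxor mascara (1 <<< j.toNat)) 0 +
          PySem.List.pyGetD t j 0)
    else pvInnerA t n suma mascara (j + 1)
  else suma
termination_by (n - j).toNat
decreasing_by omega

def precalcular_suma_tr (tiempos_riego : List Int) (n : Int) (N : Int) : List Int :=
  (PySem.List.pyRange 1 N 1).foldl
    (fun suma mascara => pvInnerA tiempos_riego n suma mascara 0)
    (List.replicate N.toNat 0)

-- ===== PORT B =====
-- 'while len(suma_tr) < N: suma_tr = suma_tr + [x + add for x in suma_tr]; j += 1'
-- (the 0 < res.length argument is only a termination guard: the list starts at [0] and doubles)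
def pvAltLoop (t : List Int) (n : Int) (N : Int) (j : Nat) (res : List Int)
    (h : 0 < res.length) : List Int :=
  if hlt : (res.length : Int) < N then
    pvAltLoop t n N (j + 1)
      (res ++ res.map (· + (if (j : Int) < n then PySem.List.pyGetD t (j : Int) 0 else 0)))
      (by simpa using Nat.lt_of_lt_of_le h (by simp))
  else res
termination_by N.toNat - res.length
decreasing_by simp; omega

def precalcular_suma_tr_alt (tiempos_riego : List Int) (n : Int) (N : Int) : List Int :=
  PySem.List.slice (pvAltLoop tiempos_riego n N 0 [0] (by simp)) none (some N)

-- ===== PRECONDITION & SPEC =====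
-- Pre_ excludes exactly the inputs where A raises IndexError (tiempos_riego[j] with
-- len(tiempos_riego) ≤ j < n reached because some mask < N has lowest set bit j).
def Pre_precalcular_suma_tr (tiempos_riego : List Int) (n : Int) (N : Int) : Prop :=
  ¬ ((tiempos_riego.length : Int) < n ∧ ((2 ^ tiempos_riego.length : Nat) : Int) < N)
instance (tiempos_riego : List Int) (n : Int) (N : Int) : Decidable (Pre_precalcular_suma_tr tiempos_riego n N) := by unfold Pre_precalcular_suma_tr; infer_instance
def pvWitness_precalcular_suma_tr : List Int × Int × Int := ([3, 5], 2, 4)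

def Spec_precalcular_suma_tr (tiempos_riego : List Int) (n : Int) (N : Int) (out : List Int) : Prop := out = precalcular_suma_tr_alt tiempos_riego n N
instance (tiempos_riego : List Int) (n : Int) (N : Int) (out : List Int) : Decidable (Spec_precalcular_suma_tr tiempos_riego n N out) := by unfold Spec_precalcular_suma_tr; infer_instance

-- ===== CLAIM (what is proved, stated in full; the proofs are below) =====
def Claim_equal_precalcular_suma_tr : Prop := ∀ (tiempos_riego : List Int) (n : Int) (N : Int), Dom_precalcular_suma_tr tiempos_riego n N → Pre_precalcular_suma_tr tiempos_riego n N → Spec_precalcular_suma_tr tiempos_riego n N (precalcular_suma_tr tiempos_riego n N)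

-- ===== LEMMAS AND PROOFS =====

-- S t n i m = Σ over set bits b of m of tiempos_riego[i+b] (only positions i+b < n count):
-- the value both programs store at mask m (with i the bit offset already consumed).
def S (t : List Int) (n : Int) (i : Nat) (m : Nat) : Int :=
  if _h : m = 0 then 0
  else
    (if m % 2 = 1 ∧ (i : Int) < n then PySem.List.pyGetD t (i : Int) 0 else 0) +
      S t n (i + 1) (m / 2)
termination_by m
decreasing_by exact Nat.div_lt_self (by omega) (by omega)

theorem S_zero (t : List Int) (n : Int) (i : Nat) : S t n i 0 = 0 := by
  simp [S]

theorem S_eq (t : List Int) (n : Int) (i : Nat) (m : Nat) :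
    S t n i m =
      (if m % 2 = 1 ∧ (i : Int) < n then PySem.List.pyGetD t (i : Int) 0 else 0) +
        S t n (i + 1) (m / 2) := by
  by_cases h : m = 0
  · subst h; simp [S_zero]
  · rw [S]; simp [h]

theorem S_of_n_le (t : List Int) (n : Int) (i : Nat) (m : Nat) (h : n ≤ (i : Int)) :
    S t n i m = 0 := by
  induction m using Nat.strong_induction_on generalizing i with
  | _ m ih =>
    by_cases hm : m = 0
    · subst hm; exact S_zero t n i
    · rw [S_eq]
      rw [if_neg (by rintro ⟨-, hlt⟩; omega), ih (m / 2) (Nat.div_lt_self (by omega) (by omega)) (i + 1) (by push_cast; omega)]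
      simp

theorem S_shift (t : List Int) (n : Int) (j : Nat) :
    ∀ (q i : Nat), S t n i (2 ^ j * q) = S t n (i + j) q := by
  induction j with
  | zero => intro q i; simp
  | succ j ih =>
    intro q i
    by_cases hq : q = 0
    · subst hq; simp [S_zero]
    · rw [S_eq]
      have hmm : 2 ^ (j + 1) * q = 2 * (2 ^ j * q) := by ring
      have h1 : 2 ^ (j + 1) * q % 2 = 0 := by omega
      have h2 : 2 ^ (j + 1) * q / 2 = 2 ^ j * q := by omega
      rw [h1, h2, ih q (i + 1)]
      rw [if_neg (by omega)]
      simp [Nat.add_assoc, Nat.add_comm 1 j]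

theorem S_odd (t : List Int) (n : Int) (i k : Nat) :
    S t n i (2 * k + 1) =
      (if (i : Int) < n then PySem.List.pyGetD t (i : Int) 0 else 0) + S t n (i + 1) k := by
  rw [S_eq]
  have h1 : (2 * k + 1) % 2 = 1 := by omega
  have h2 : (2 * k + 1) / 2 = k := by omega
  rw [h1, h2]
  simp

-- B's doubling step: adding bit j on top of m < 2^j adds tiempos_riego[j] (if j < n).
theorem S_add_pow (t : List Int) (n : Int) :
    ∀ (j i m : Nat), m < 2 ^ j →
      S t n i (m + 2 ^ j) =
        S t n i m + (if ((i + j : Nat) : Int) < n then PySem.List.pyGetD t ((i + j : Nat) : Int) 0 else 0) := by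
  intro j
  induction j with
  | zero =>
    intro i m hm
    have : m = 0 := by omega
    subst this
    simp only [Nat.pow_zero, Nat.zero_add, Nat.add_zero]
    rw [S_eq]
    simp [S_zero]
  | succ j ih =>
    intro i m hm
    have hp : 2 ^ (j + 1) = 2 * 2 ^ j := by ring
    have h1 : (m + 2 ^ (j + 1)) % 2 = m % 2 := by omega
    have h2 : (m + 2 ^ (j + 1)) / 2 = m / 2 + 2 ^ j := by omega
    rw [S_eq (m := m + 2 ^ (j + 1)), h1, h2, ih (i + 1) (m / 2) (by omega),
      S_eq (m := m)]
    have : ((i + 1 + j : Nat) : Int) = ((i + (j + 1) : Nat) : Int) := by push_cast; ring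
    rw [this]
    ring

-- every positive M is 2^j0 * (2k+1) (j0 = lowest set bit)
theorem exists_odd_decomp : ∀ (M : Nat), 0 < M → ∃ j0 k, M = 2 ^ j0 * (2 * k + 1) := by
  intro M
  induction M using Nat.strong_induction_on with
  | _ M ih =>
    intro hM
    rcases Nat.even_or_odd M with he | ho
    · obtain ⟨c, hc⟩ := he
      obtain ⟨j0, k, hjk⟩ := ih c (by omega) (by omega)
      exact ⟨j0 + 1, k, by subst hc; rw [hjk]; ring⟩
    · obtain ⟨k, hk⟩ := ho
      exact ⟨0, k, by omega⟩

theorem testBit_decomp (j0 k : Nat) :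
    ∀ i, i ≤ j0 → Nat.testBit (2 ^ j0 * (2 * k + 1)) i = decide (i = j0) := by
  intro i hi
  rw [Nat.testBit_eq_decide_div_mod_eq]
  have hsplit : 2 ^ j0 = 2 ^ i * 2 ^ (j0 - i) := by
    rw [← Nat.pow_add]; congr 1; omega
  have hdiv : 2 ^ j0 * (2 * k + 1) / 2 ^ i = 2 ^ (j0 - i) * (2 * k + 1) := by
    rw [hsplit, Nat.mul_assoc, Nat.mul_div_cancel_left _ (Nat.two_pow_pos i)]
  rw [hdiv]
  by_cases h : i = j0
  · subst h; simp
  · have hc : 2 ^ (j0 - i) = 2 * 2 ^ (j0 - i - 1) := by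
      rw [← Nat.pow_succ']; congr 1; omega
    have hval : 2 ^ (j0 - i) * (2 * k + 1) = 2 * (2 ^ (j0 - i - 1) * (2 * k + 1)) := by
      rw [hc]; ring
    simp only [decide_eq_decide]
    constructor
    · intro hmod; omega
    · intro hij; omega

theorem xor_lowbit (j0 : Nat) : ∀ k, (2 ^ j0 * (2 * k + 1)) ^^^ 2 ^ j0 = 2 ^ (j0 + 1) * k := by
  induction j0 with
  | zero =>
    intro k
    have hd : ((2 * k + 1) ^^^ 1) / 2 = k := by
      rw [Nat.xor_div_two]
      have h1 : (2 * k + 1) / 2 = k := by omega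
      have h2 : 1 / 2 = 0 := by omega
      rw [h1, h2, Nat.xor_zero]
    have hm : ((2 * k + 1) ^^^ 1) % 2 = 0 := by
      rcases Nat.mod_two_eq_zero_or_one ((2 * k + 1) ^^^ 1) with h | h
      · exact h
      · exfalso
        have := Nat.xor_mod_two_eq_one.mp h
        omega
    have := Nat.div_add_mod ((2 * k + 1) ^^^ 1) 2
    simp only [Nat.pow_zero, Nat.one_mul, Nat.pow_succ]
    omega
  | succ j0 ih =>
    intro k
    have hx : (2 ^ (j0 + 1) * (2 * k + 1)) ^^^ 2 ^ (j0 + 1) =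
        2 * ((2 ^ j0 * (2 * k + 1)) ^^^ 2 ^ j0) := by
      have hd : ((2 ^ (j0 + 1) * (2 * k + 1)) ^^^ 2 ^ (j0 + 1)) / 2 =
          (2 ^ j0 * (2 * k + 1)) ^^^ 2 ^ j0 := by
        rw [Nat.xor_div_two]
        congr 1
        · have : 2 ^ (j0 + 1) * (2 * k + 1) = 2 * (2 ^ j0 * (2 * k + 1)) := by ring
          omega
        · have : 2 ^ (j0 + 1) = 2 * 2 ^ j0 := by ring
          omega
      have hm : ((2 ^ (j0 + 1) * (2 * k + 1)) ^^^ 2 ^ (j0 + 1)) % 2 = 0 := by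
        rcases Nat.mod_two_eq_zero_or_one ((2 ^ (j0 + 1) * (2 * k + 1)) ^^^ 2 ^ (j0 + 1)) with h | h
        · exact h
        · exfalso
          have e1 : 2 ^ (j0 + 1) * (2 * k + 1) = 2 * (2 ^ j0 * (2 * k + 1)) := by ring
          have e2 : 2 ^ (j0 + 1) = 2 * 2 ^ j0 := by ring
          have := Nat.xor_mod_two_eq_one.mp h
          omega
      have := Nat.div_add_mod ((2 ^ (j0 + 1) * (2 * k + 1)) ^^^ 2 ^ (j0 + 1)) 2
      omega
    rw [hx, ih k]
    ring

-- A's inner scan, characterised via the lowest-set-bit decomposition of the mask.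
theorem innerA_scan (t : List Int) (n : Int) (suma : List Int) (j0 k : Nat) :
    ∀ (d i : Nat), i + d = j0 →
      pvInnerA t n suma ((2 ^ j0 * (2 * k + 1) : Nat) : Int) (i : Int) =
        if (j0 : Int) < n then
          PySem.List.pySetD suma ((2 ^ j0 * (2 * k + 1) : Nat) : Int)
            (PySem.List.pyGetD suma ((2 ^ (j0 + 1) * k : Nat) : Int) 0 +
              PySem.List.pyGetD t (j0 : Int) 0)
        else suma := by
  intro d
  induction d with
  | zero =>
    intro i hi
    rw [pvInnerA]
    by_cases hn : n ≤ (i : Int)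
    · rw [dif_neg (by omega), if_neg (by omega)]
    · rw [dif_pos (by omega)]
      have hij : i = j0 := by omega
      subst hij
      simp only [Int.toNat_natCast, PySem.Int.band_natCast, PySem.Int.bxor_natCast,
        Nat.one_shiftLeft]
      rw [if_pos (by
        simp only [ne_eq, Int.natCast_eq_zero]
        rw [Nat.and_two_pow, testBit_decomp i k i (le_refl i)]
        simp)]
      rw [xor_lowbit i k]
      rw [if_pos (by omega)]
  | succ d ih =>
    intro i hi
    rw [pvInnerA]
    by_cases hn : n ≤ (i : Int)
    · rw [dif_neg (by omega), if_neg (by omega)]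
    · rw [dif_pos (by omega)]
      simp only [Int.toNat_natCast, PySem.Int.band_natCast, Nat.one_shiftLeft]
      rw [if_neg (by
        simp only [ne_eq, Int.natCast_eq_zero, not_not]
        rw [Nat.and_two_pow, testBit_decomp j0 k i (by omega)]
        simp [show i ≠ j0 by omega])]
      have hc : ((i : Int) + 1) = ((i + 1 : Nat) : Int) := by push_cast; ring
      rw [hc, ih (i + 1) (by omega)]

-- the state after masks 1 .. M-1 have been processed
def stateA (t : List Int) (n : Int) (NN M : Nat) : List Int :=
  (List.range M).map (S t n 0) ++ List.replicate (NN - M) 0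

theorem getD_stateA (t : List Int) (n : Int) (NN M p : Nat) (hp : p < M) :
    (stateA t n NN M).getD p 0 = S t n 0 p := by
  unfold stateA
  rw [List.getD_append _ _ _ _ (by simpa using hp)]
  simp [List.getD, hp]

-- one step of A's outer fold advances stateA by one
theorem stepA (t : List Int) (n : Int) (NN M : Nat) (h1 : 1 ≤ M) (h2 : M < NN) :
    pvInnerA t n (stateA t n NN M) ((M : Nat) : Int) 0 =
      stateA t n NN (M + 1) := by
  obtain ⟨j0, k, hM⟩ := exists_odd_decomp M h1
  have hlen : (stateA t n NN M).length = NN := by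
    unfold stateA; simp; omega
  have hsplit : stateA t n NN M =
      (List.range M).map (S t n 0) ++ 0 :: List.replicate (NN - M - 1) 0 := by
    unfold stateA
    congr 1
    rw [show NN - M = (NN - M - 1) + 1 by omega]
    simp [List.replicate_succ]
  have hstate1 : stateA t n NN (M + 1) =
      (List.range M).map (S t n 0) ++ S t n 0 M :: List.replicate (NN - M - 1) 0 := by
    unfold stateA
    rw [List.range_succ, List.map_append]
    simp [show NN - (M + 1) = NN - M - 1 by omega]
  have hscan := innerA_scan t n (stateA t n NN M) j0 k j0 0 (by omega)
  rw [← hM] at hscan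
  have h0 : ((0 : Nat) : Int) = (0 : Int) := rfl
  rw [h0] at hscan
  rw [hscan]
  have hprev : 2 ^ (j0 + 1) * k < M := by
    have e1 : 2 ^ (j0 + 1) * k = 2 ^ j0 * (2 * k) := by ring
    have e2 : 2 ^ j0 * (2 * k + 1) = 2 ^ j0 * (2 * k) + 2 ^ j0 := by ring
    have e3 := Nat.two_pow_pos j0
    omega
  by_cases hj : (j0 : Int) < n
  · rw [if_pos hj]
    have hget : PySem.List.pyGetD (stateA t n NN M) ((2 ^ (j0 + 1) * k : Nat) : Int) 0 =
        S t n 0 (2 ^ (j0 + 1) * k) := by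
      rw [PySem.List.pyGetD_natCast, getD_stateA t n NN M _ hprev]
    rw [hget]
    have hSM : S t n 0 M =
        S t n 0 (2 ^ (j0 + 1) * k) + PySem.List.pyGetD t (j0 : Int) 0 := by
      have e1 : S t n 0 M = S t n j0 (2 * k + 1) := by
        rw [hM]; simpa using S_shift t n j0 (2 * k + 1) 0
      have e2 : S t n 0 (2 ^ (j0 + 1) * k) = S t n (j0 + 1) k := by
        simpa using S_shift t n (j0 + 1) k 0
      rw [e1, e2, S_odd, if_pos (by omega)]
      ring
    have hMlen : M < (stateA t n NN M).length := by omega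
    have hset : PySem.List.pySetD (stateA t n NN M) ((M : Nat) : Int)
          (S t n 0 (2 ^ (j0 + 1) * k) + PySem.List.pyGetD t (j0 : Int) 0) =
        (stateA t n NN M).set M
          (S t n 0 (2 ^ (j0 + 1) * k) + PySem.List.pyGetD t (j0 : Int) 0) := by
      simp [PySem.List.pySetD, PySem.List.pySet?_natCast _ _ _ hMlen]
    rw [hset, hstate1, ← hSM]
    conv_lhs => rw [hsplit]
    rw [List.set_append_right _ _ (by simp)]
    simp [List.set_cons_zero]
  · rw [if_neg hj]
    -- S M = 0 here, so the state is unchanged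
    have hSM : S t n 0 M = 0 := by
      have e1 : S t n 0 M = S t n j0 (2 * k + 1) := by
        rw [hM]; simpa using S_shift t n j0 (2 * k + 1) 0
      rw [e1, S_odd, if_neg (by omega),
        S_of_n_le t n (j0 + 1) k (by push_cast; omega)]
      simp
    rw [hstate1, hSM, hsplit]

-- A's outer fold from mask M up, starting from stateA M, reaches stateA NN
theorem foldA (t : List Int) (n : Int) (N : Int) (hN : 1 ≤ N) :
    ∀ (d M : Nat), 1 ≤ M → M + d = N.toNat →
      (PySem.List.pyRange (M : Int) N 1).foldl
          (fun suma mascara => pvInnerA t n suma mascara 0)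
          (stateA t n N.toNat M) =
        stateA t n N.toNat N.toNat := by
  intro d
  induction d with
  | zero =>
    intro M h1 h2
    rw [PySem.List.pyRange_one_eq_nil (a := (M : Int)) (b := N) (by omega)]
    simp only [List.foldl_nil]
    have hMN : M = N.toNat := by omega
    rw [hMN]
  | succ d ih =>
    intro M h1 h2
    rw [PySem.List.pyRange_one_cons (a := (M : Int)) (b := N) (by omega)]
    simp only [List.foldl_cons]
    rw [stepA t n N.toNat M h1 (by omega)]
    have hc : ((M : Int) + 1) = ((M + 1 : Nat) : Int) := by push_cast; ring
    rw [hc, ih (M + 1) (by omega) (by omega)]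

theorem A_char (t : List Int) (n : Int) (N : Int) :
    precalcular_suma_tr t n N = (List.range N.toNat).map (S t n 0) := by
  unfold precalcular_suma_tr
  by_cases hN : 1 ≤ N
  · have hstart : List.replicate N.toNat (0 : Int) = stateA t n N.toNat 1 := by
      have h3 : stateA t n N.toNat 1 = 0 :: List.replicate (N.toNat - 1) 0 := by
        simp [stateA, S_zero]
      rw [h3]
      conv_lhs => rw [show N.toNat = (N.toNat - 1) + 1 by omega]
      rw [List.replicate_succ]
    have hfold := foldA t n N hN (N.toNat - 1) 1 (le_refl 1) (by omega)
    norm_num at hfold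
    rw [hstart, hfold]
    simp [stateA]
  · rw [PySem.List.pyRange_one_eq_nil (a := (1 : Int)) (b := N) (by omega)]
    simp [show N.toNat = 0 by omega]

-- B-side: the loop keeps res = map (S t n 0) (range 2^j) and ends with 2^p ≥ N
theorem B_loop (t : List Int) (n : Int) (N : Int) :
    ∀ (d j : Nat) (res : List Int) (h : 0 < res.length),
      res = (List.range (2 ^ j)).map (S t n 0) →
      d = N.toNat - 2 ^ j →
      ∃ p : Nat, (N : Int) ≤ ((2 ^ p : Nat) : Int) ∧
        pvAltLoop t n N j res h = (List.range (2 ^ p)).map (S t n 0) := by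
  intro d
  induction d using Nat.strong_induction_on with
  | _ d ih =>
    intro j res h hres hd
    rw [pvAltLoop]
    have hlen : res.length = 2 ^ j := by rw [hres]; simp
    by_cases hlt : ((res.length : Int) < N)
    · rw [dif_pos hlt]
      have hnext : res ++ res.map
            (· + (if (j : Int) < n then PySem.List.pyGetD t (j : Int) 0 else 0)) =
          (List.range (2 ^ (j + 1))).map (S t n 0) := by
        rw [hres, show 2 ^ (j + 1) = 2 ^ j + 2 ^ j by ring, List.range_add, List.map_append]
        congr 1
        rw [List.map_map, List.map_map]
        apply List.map_congr_left
        intro m hm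
        simp only [Function.comp_apply]
        rw [Nat.add_comm (2 ^ j) m, S_add_pow t n j 0 m (by simpa using hm)]
        simp
      have hmeas : N.toNat - 2 ^ (j + 1) < d := by
        rw [hlen] at hlt
        have hj1 : 2 ^ j < N.toNat := by omega
        have hj2 : 2 ^ (j + 1) = 2 * 2 ^ j := by ring
        have hj3 := Nat.two_pow_pos j
        omega
      exact ih (N.toNat - 2 ^ (j + 1)) hmeas (j + 1) _ _ hnext rfl
    · rw [dif_neg hlt]
      refine ⟨j, by omega, by rw [hres]⟩

theorem B_char (t : List Int) (n : Int) (N : Int) :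
    precalcular_suma_tr_alt t n N = (List.range N.toNat).map (S t n 0) := by
  unfold precalcular_suma_tr_alt
  by_cases hN : 0 ≤ N
  · obtain ⟨p, hp1, hp2⟩ :=
      B_loop t n N (N.toNat - 2 ^ 0) 0 [0] (by simp) (by simp [S_zero]) rfl
    rw [hp2, PySem.List.slice_to _ hN, ← List.map_take, List.take_range]
    congr 2
    omega
  · have hstop : pvAltLoop t n N 0 [0] (by simp) = [0] := by
      rw [pvAltLoop]
      rw [dif_neg (by simp; omega)]
    rw [hstop]
    have h1 : PySem.List.slice [(0 : Int)] none (some N) = [] := by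
      rw [show N = -(((-N).toNat : Nat) : Int) by omega,
        PySem.List.slice_to_neg_natCast _ _ (by omega)]
      simp [show 1 - (-N).toNat = 0 by omega]
    rw [h1, show N.toNat = 0 by omega]
    simp

-- ===== VERDICT (by name: the statement is the Claim_ definition above) =====
theorem precalcular_suma_tr_spec : Claim_equal_precalcular_suma_tr := by
  intro t n N _ _
  unfold Spec_precalcular_suma_tr
  rw [A_char, B_char]
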